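-- pv_equiv track=rewrite | github.com/amnonskalka/ip_detection | func.py | ip_options_old
-- ===== SOURCE A (Python) =====
-- def ip_options_old(a):
--     tmp_list = []
--     opt = {}
--     ip_list = []
--     opt_num = 0
--
--     for x in a:
--         if x.isdigit():
--             if len(tmp_list) < 3:
--                 tmp_list.append(x)
--             else:
--                 opt_dic = map(str, tmp_list)
--                 opt['opt' + str(opt_num)] = ''.join(opt_dic)
--                 tmp_list = []
--                 tmp_list.append(x)
--                 opt_num += 1
--         elif x == '.':
--             opt_dic = map(str, tmp_list)
--             opt['opt' + str(opt_num)] = ''.join(opt_dic)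
--             ip_list.append(opt)
--             tmp_list = []
--             opt = {}
--
--     opt_dic = map(str, tmp_list)
--     opt['opt' + str(opt_num)] = ''.join(opt_dic)
--     ip_list.append(opt)
--
--     return ip_list
-- ===== SOURCE B (Python) =====
-- def ip_options_old(a):
--     # pass 1: split into digit-only segments on '.'
--     segs = []
--     cur = ''
--     for x in a:
--         if x.isdigit():
--             cur += x
--         elif x == '.':
--             segs.append(cur)
--             cur = ''
--     segs.append(cur)
--     # pass 2: chunk each segment into groups of 3, numbering keys globally
--     ip_list = []
--     opt_num = 0
--     for s in segs:
--         if s: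
--             chunks = []
--             while s:
--                 chunks.append(s[:3])
--                 s = s[3:]
--         else:
--             chunks = ['']
--         opt = {}
--         for j, c in enumerate(chunks):
--             opt['opt' + str(opt_num + j)] = c
--         opt_num += len(chunks) - 1
--         ip_list.append(opt)
--     return ip_list
-- ===== Notes on version B (the rewrite author's own statement) =====
-- stated objective: simpler
-- what changed: A's single character loop threading four pieces of mutable state (tmp_list, opt, ip_list, opt_num) is replaced by two plain passes: first split the input into digit-only segments on '.', then chunk each segment into groups of 3 and number the keys with a global counter advanced by len(chunks)-1 per segment.
import Mathlib
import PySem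

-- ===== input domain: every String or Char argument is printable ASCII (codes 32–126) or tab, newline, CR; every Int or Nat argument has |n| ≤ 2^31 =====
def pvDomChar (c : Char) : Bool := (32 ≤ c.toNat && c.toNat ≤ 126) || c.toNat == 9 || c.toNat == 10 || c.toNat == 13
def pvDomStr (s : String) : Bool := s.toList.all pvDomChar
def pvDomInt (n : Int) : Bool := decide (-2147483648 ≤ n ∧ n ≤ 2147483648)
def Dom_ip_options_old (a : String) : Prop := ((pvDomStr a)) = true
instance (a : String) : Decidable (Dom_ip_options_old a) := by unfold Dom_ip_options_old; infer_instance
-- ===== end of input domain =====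

-- B re-decomposes A's single stateful scan into two passes (split into digit segments on '.',
-- then chunk each segment into groups of 3 with globally numbered keys); objective: simpler. A = B everywhere.

-- ===== PORT A =====
-- 'opt' + str(opt_num)
def pvKey (n : Int) : String := "opt" ++ PySem.Int.toStr n

-- the body of A's `for x in a` loop; state = (tmp_list, opt, ip_list, opt_num)
-- (''.join(map(str, tmp_list)) on a list of single chars is String.ofList tmp_list)
def pvStepA (st : List Char × PySem.Dict String String × List (List (String × String)) × Int)
    (x : Char) : List Char × PySem.Dict String String × List (List (String × String)) × Int :=
  if PySem.Chars.isdigit x then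
    if st.1.length < 3 then (st.1 ++ [x], st.2.1, st.2.2.1, st.2.2.2)
    else ([x], st.2.1.insert (pvKey st.2.2.2) (String.ofList st.1), st.2.2.1, st.2.2.2 + 1)
  else if x = '.' then
    ([], PySem.Dict.empty,
     st.2.2.1 ++ [(st.2.1.insert (pvKey st.2.2.2) (String.ofList st.1)).items], st.2.2.2)
  else st

-- A's code after the loop: final flush of tmp_list into opt and append to ip_list
def pvFinA (st : List Char × PySem.Dict String String × List (List (String × String)) × Int) :
    List (List (String × String)) :=
  st.2.2.1 ++ [(st.2.1.insert (pvKey st.2.2.2) (String.ofList st.1)).items]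

def ip_options_old (a : String) : List (List (String × String)) :=
  pvFinA (a.toList.foldl pvStepA ([], PySem.Dict.empty, [], 0))

-- ===== PORT B =====
-- pass 1 loop body: split into digit-only segments on '.'; state = (segs, cur)
def pvStepSeg (st : List (List Char) × List Char) (x : Char) : List (List Char) × List Char :=
  if PySem.Chars.isdigit x then (st.1, st.2 ++ [x])
  else if x = '.' then (st.1 ++ [st.2], [])
  else st

-- after pass 1: segs.append(cur)
def pvJoinSegs (st : List (List Char) × List Char) : List (List Char) := st.1 ++ [st.2]

-- `while s: chunks.append(s[:3]); s = s[3:]`  (s[:3]/s[3:] with nonneg in-range bounds = take 3 / drop 3)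
def pvChunkLoop (s : List Char) : List (List Char) :=
  if s = [] then [] else s.take 3 :: pvChunkLoop (s.drop 3)
termination_by s.length
decreasing_by
  have : 0 < s.length := List.length_pos_iff.mpr (by assumption)
  simp only [List.length_drop]; omega

-- inner `for c in chunks` loop body: opt['opt' + str(j)] = c; j += 1
def pvChunkIns (p : PySem.Dict String String × Int) (c : List Char) :
    PySem.Dict String String × Int :=
  (p.1.insert (pvKey p.2) (String.ofList c), p.2 + 1)

-- pass 2 loop body; state = (ip_list, opt_num)
def pvSegStep (st : List (List (String × String)) × Int) (s : List Char) :
    List (List (String × String)) × Int :=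
  let chunks := if s = [] then [[]] else pvChunkLoop s
  let p := chunks.foldl pvChunkIns (PySem.Dict.empty, st.2)
  (st.1 ++ [p.1.items], p.2 - 1)

def ip_options_old_alt (a : String) : List (List (String × String)) :=
  ((pvJoinSegs (a.toList.foldl pvStepSeg ([], []))).foldl pvSegStep ([], 0)).1

-- ===== PRECONDITION & SPEC =====
def Spec_ip_options_old (a : String) (out : List (List (String × String))) : Prop := out = ip_options_old_alt a
instance (a : String) (out : List (List (String × String))) : Decidable (Spec_ip_options_old a out) := by unfold Spec_ip_options_old; infer_instance

-- ===== CLAIM (what is proved, stated in full; the proofs are below) =====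
def Claim_equal_ip_options_old : Prop := ∀ (a : String), Dom_ip_options_old a → Spec_ip_options_old a (ip_options_old a)

-- ===== LEMMAS AND PROOFS =====

-- the digits of the current (first) segment of cs, and the remaining segments
def pvFirstSeg : List Char → List Char
  | [] => []
  | x :: xs => if PySem.Chars.isdigit x then x :: pvFirstSeg xs
               else if x = '.' then [] else pvFirstSeg xs

def pvRestSegs : List Char → List (List Char)
  | [] => []
  | x :: xs => if PySem.Chars.isdigit x then pvRestSegs xs
               else if x = '.' then pvFirstSeg xs :: pvRestSegs xs else pvRestSegs xs

-- A's remaining computation as a recursion on the remaining characters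
def pvF : PySem.Dict String String → List Char → Int → List Char → List (List (String × String))
  | opt, t, n, [] => [(opt.insert (pvKey n) (String.ofList t)).items]
  | opt, t, n, x :: xs =>
    if PySem.Chars.isdigit x then
      if t.length < 3 then pvF opt (t ++ [x]) n xs
      else pvF (opt.insert (pvKey n) (String.ofList t)) [x] (n + 1) xs
    else if x = '.' then
      (opt.insert (pvKey n) (String.ofList t)).items :: pvF PySem.Dict.empty [] n xs
    else pvF opt t n xs

-- B's second pass as a recursion on the segment list
def pvG : Int → List (List Char) → List (List (String × String))
  | _, [] => []
  | n, s :: ss =>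
    let chunks := if s = [] then [[]] else pvChunkLoop s
    let p := chunks.foldl pvChunkIns (PySem.Dict.empty, n)
    p.1.items :: pvG (p.2 - 1) ss

-- chunking continued from a partial chunk t (A's tmp_list) equals B's chunk loop on all the digits
def pvChunkCont : List Char → List Char → List (List Char)
  | t, [] => [t]
  | t, d :: ds => if t.length < 3 then pvChunkCont (t ++ [d]) ds else t :: pvChunkCont [d] ds

lemma pvChunkCont_eq_loop : ∀ (s t : List Char), t.length ≤ 3 → t ++ s ≠ [] →
    pvChunkCont t s = pvChunkLoop (t ++ s) := by
  intro s
  induction s with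
  | nil =>
    intro t ht hne
    rw [pvChunkLoop]
    simp only [List.append_nil] at hne ⊢
    rw [if_neg hne]
    rw [List.take_of_length_le ht, List.drop_eq_nil_of_le ht, pvChunkLoop]
    rfl
  | cons d ds ih =>
    intro t ht hne
    by_cases hlt : t.length < 3
    · have h1 : (t ++ [d]).length ≤ 3 := by simp; omega
      have := ih (t ++ [d]) h1 (by simp)
      simp only [pvChunkCont, if_pos hlt, this, List.append_assoc, List.singleton_append]
    · have ht3 : t.length = 3 := by omega
      have htake : (t ++ d :: ds).take 3 = t := by rw [← ht3]; exact List.take_left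
      have hdrop : (t ++ d :: ds).drop 3 = d :: ds := by rw [← ht3]; exact List.drop_left
      rw [pvChunkCont, if_neg hlt]
      conv_rhs => rw [pvChunkLoop]
      rw [if_neg (by simp), htake, hdrop]
      have := ih [d] (by simp) (by simp)
      simp only [List.singleton_append] at this
      rw [this]

lemma pvChunkCont_nil (s : List Char) :
    pvChunkCont [] s = if s = [] then [[]] else pvChunkLoop s := by
  cases hs : s with
  | nil => rfl
  | cons d ds =>
    rw [if_neg (by simp)]
    have := pvChunkCont_eq_loop (d :: ds) [] (by simp) (by simp)
    simpa using this

-- A's fold equals pvF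
lemma pvA_fold : ∀ (cs t : List Char) (opt : PySem.Dict String String)
    (ips : List (List (String × String))) (n : Int),
    pvFinA (cs.foldl pvStepA (t, opt, ips, n)) = ips ++ pvF opt t n cs := by
  intro cs
  induction cs with
  | nil => intro t opt ips n; simp [pvF, pvFinA]
  | cons x xs ih =>
    intro t opt ips n
    simp only [List.foldl_cons, pvStepA, pvF]
    by_cases hd : PySem.Chars.isdigit x
    · by_cases hl : t.length < 3
      · simpa [hd, hl] using ih (t ++ [x]) opt ips n
      · simpa [hd, hl] using ih [x] (opt.insert (pvKey n) (String.ofList t)) ips (n + 1)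
    · by_cases hp : x = '.'
      · simp only [if_neg hd, if_pos hp]
        rw [ih [] PySem.Dict.empty (ips ++ [(opt.insert (pvKey n) (String.ofList t)).items]) n]
        rw [List.append_assoc, List.singleton_append]
      · simp only [if_neg hd, if_neg hp]
        exact ih t opt ips n

-- B's pass-1 fold produces pvFirstSeg/pvRestSegs
lemma pvB_split : ∀ (cs : List Char) (segs : List (List Char)) (cur : List Char),
    pvJoinSegs (cs.foldl pvStepSeg (segs, cur))
      = segs ++ ((cur ++ pvFirstSeg cs) :: pvRestSegs cs) := by
  intro cs
  induction cs with
  | nil => intro segs cur; simp [pvFirstSeg, pvRestSegs, pvJoinSegs]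
  | cons x xs ih =>
    intro segs cur
    simp only [List.foldl_cons, pvStepSeg, pvFirstSeg, pvRestSegs]
    by_cases hd : PySem.Chars.isdigit x
    · simpa [hd, List.append_assoc] using ih segs (cur ++ [x])
    · by_cases hp : x = '.'
      · simp only [if_neg hd, if_pos hp]
        rw [ih (segs ++ [cur]) []]
        simp [List.append_assoc]
      · simp only [if_neg hd, if_neg hp]
        exact ih segs cur

-- B's pass-2 fold equals pvG
lemma pvB_fold : ∀ (segs : List (List Char)) (ips : List (List (String × String))) (n : Int),
    (segs.foldl pvSegStep (ips, n)).1 = ips ++ pvG n segs := by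
  intro segs
  induction segs with
  | nil => intro ips n; simp [pvG]
  | cons s ss ih =>
    intro ips n
    simp only [List.foldl_cons, pvSegStep, pvG]
    rw [ih, List.append_assoc, List.singleton_append]

-- the crux: A's scan, resumed from a partial chunk, equals B's chunked per-segment form
lemma pvF_eq_pvG : ∀ (cs t : List Char) (opt : PySem.Dict String String) (n : Int),
    t.length ≤ 3 →
    pvF opt t n cs =
      ((pvChunkCont t (pvFirstSeg cs)).foldl pvChunkIns (opt, n)).1.items ::
        pvG (((pvChunkCont t (pvFirstSeg cs)).foldl pvChunkIns (opt, n)).2 - 1) (pvRestSegs cs) := by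
  intro cs
  induction cs with
  | nil =>
    intro t opt n ht
    simp [pvF, pvFirstSeg, pvRestSegs, pvChunkCont, pvChunkIns, pvG]
  | cons x xs ih =>
    intro t opt n ht
    simp only [pvF, pvFirstSeg, pvRestSegs]
    by_cases hd : PySem.Chars.isdigit x
    · by_cases hl : t.length < 3
      · simp only [if_pos hd, if_pos hl]
        rw [ih (t ++ [x]) opt n (by simp; omega)]
        simp only [pvChunkCont, if_pos hl]
      · simp only [if_pos hd, if_neg hl]
        rw [ih [x] (opt.insert (pvKey n) (String.ofList t)) (n + 1) (by simp)]
        simp only [pvChunkCont, if_neg hl, List.foldl_cons, pvChunkIns]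
    · by_cases hp : x = '.'
      · simp only [if_neg hd, if_pos hp]
        rw [ih [] PySem.Dict.empty n (by simp), pvChunkCont_nil]
        simp [pvChunkCont, pvChunkIns, pvG]
      · simp only [if_neg hd, if_neg hp]
        exact ih t opt n ht

-- ===== VERDICT (by name: the statement is the Claim_ definition above) =====
theorem ip_options_old_spec : Claim_equal_ip_options_old := by
  intro a _
  show ip_options_old a = ip_options_old_alt a
  unfold ip_options_old ip_options_old_alt
  rw [pvA_fold a.toList [] PySem.Dict.empty [] 0]
  rw [pvB_split a.toList [] []]
  rw [pvB_fold]
  rw [pvF_eq_pvG a.toList [] PySem.Dict.empty 0 (by simp)]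
  simp only [List.nil_append, pvG, pvChunkCont_nil]
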